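-- pv_equiv track=rewrite | github.com/RayanC94/vr_assistant | app/rag/ingest.py | smart_chunk_markdown
-- ===== SOURCE A (Python) =====
-- def smart_chunk_markdown(md_body: str) -> list[str]:
--     # Chunking simple par sections (##) avec fallback
--     parts = []
--     current = []
--     lines = md_body.splitlines()
--
--     for line in lines:
--         if line.startswith("## "):
--             if current:
--                 parts.append("\n".join(current).strip())
--                 current = []
--         current.append(line)
--
--     if current:
--         parts.append("\n".join(current).strip())
--
--     # Si trop peu de sections, fallback en chunks de taille fixe
--     if len(parts) <= 1:
--         return char_chunks(md_body)
--
--     # Nettoyage: supprimer trop petits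
--     cleaned = [p for p in parts if len(p) > 120]
--     return cleaned if cleaned else char_chunks(md_body)
--
-- def char_chunks(text: str, max_chars: int = 1800, overlap: int = 250) -> list[str]:
--     chunks = []
--     start = 0
--     while start < len(text):
--         end = min(len(text), start + max_chars)
--         chunks.append(text[start:end])
--         if end == len(text):
--             break
--         start = max(0, end - overlap)
--     return chunks
-- ===== SOURCE B (Python) =====
-- def smart_chunk_markdown(md_body: str) -> list[str]:
--     # Index-then-slice: compute section boundary indices first, then slice between them.
--     lines = md_body.splitlines()
--     cuts = [i for i, line in enumerate(lines) if line.startswith("## ")]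
--     if not (cuts and cuts[0] == 0):
--         cuts = [0] + cuts
--     parts = ["\n".join(lines[a:b]).strip() for a, b in zip(cuts, cuts[1:] + [len(lines)])]
--     if len(parts) <= 1:
--         return char_chunks(md_body)
--     cleaned = [p for p in parts if len(p) > 120]
--     return cleaned if cleaned else char_chunks(md_body)
--
-- def char_chunks(text, max_chars=1800, overlap=250):  # unchanged fixed-size fallback
--     chunks = []
--     start = 0
--     while start < len(text):
--         end = min(len(text), start + max_chars)
--         chunks.append(text[start:end])
--         if end == len(text):
--             break
--         start = max(0, end - overlap)
--     return chunks
-- ===== Notes on version B (the rewrite author's own statement) =====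
-- stated objective: alternative
-- what changed: B replaces A's stateful accumulate-and-flush loop with an index-then-slice pass: it first computes the heading boundary indices, then builds each section by slicing the line list between consecutive boundaries; the fixed-size char_chunks fallback is kept unchanged.
import Mathlib
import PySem

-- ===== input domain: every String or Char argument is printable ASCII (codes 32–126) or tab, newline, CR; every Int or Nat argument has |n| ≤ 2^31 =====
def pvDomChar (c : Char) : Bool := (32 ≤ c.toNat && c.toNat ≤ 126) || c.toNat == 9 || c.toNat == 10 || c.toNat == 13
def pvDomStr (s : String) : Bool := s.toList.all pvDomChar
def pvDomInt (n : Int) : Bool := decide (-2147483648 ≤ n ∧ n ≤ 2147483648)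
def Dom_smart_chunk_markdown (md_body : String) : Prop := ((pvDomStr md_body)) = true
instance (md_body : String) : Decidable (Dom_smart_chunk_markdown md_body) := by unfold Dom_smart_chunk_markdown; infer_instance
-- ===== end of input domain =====

-- B replaces A's accumulate-and-flush section loop with an index-then-slice pass (boundary indices first, then slicing between them); alternative decomposition of the same cost; the char_chunks fallback is shared verbatim by both Pythons.

-- ===== PORT A =====
-- char_chunks, textually identical in both Pythons; ported at its only call's arguments (the defaults max_chars=1800, overlap=250)
def charChunksLoop (text : String) (start : Int) : Nat → List String
  | 0 => []   -- fuel guard only, never reached: the loop advances start by ≥ 1550 each iteration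
  | fuel + 1 =>
    if start < PySem.Str.len text then
      let e := min (PySem.Str.len text) (start + 1800)
      let chunk := PySem.Str.slice text (some start) (some e)
      if e = PySem.Str.len text then [chunk]
      else chunk :: charChunksLoop text (max 0 (e - 250)) fuel
    else []

def charChunks (text : String) : List String := charChunksLoop text 0 ((PySem.Str.len text).toNat + 1)

def smart_chunk_markdown (md_body : String) : List String :=
  let lines := PySem.Str.splitlines md_body
  let st := lines.foldl (fun (st : List String × List String) line =>
      let st1 := if PySem.Str.startswith line "## " then
                   (if st.2 ≠ [] then (st.1 ++ [PySem.Str.strip (PySem.Str.join "\n" st.2)], ([] : List String)) else st)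
                 else st
      (st1.1, st1.2 ++ [line])) ([], [])
  let parts := if st.2 ≠ [] then st.1 ++ [PySem.Str.strip (PySem.Str.join "\n" st.2)] else st.1
  if parts.length ≤ 1 then charChunks md_body
  else
    let cleaned := parts.filter (fun p => 120 < PySem.Str.len p)
    if cleaned ≠ [] then cleaned else charChunks md_body

-- ===== PORT B =====
def smart_chunk_markdown_alt (md_body : String) : List String :=
  let lines := PySem.Str.splitlines md_body
  let cuts0 := ((PySem.List.enumerate lines).filter (fun il => PySem.Str.startswith il.2 "## ")).map (·.1)
  let cuts := if cuts0.head? = some 0 then cuts0 else 0 :: cuts0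
  let parts := (cuts.zip (cuts.tail ++ [PySem.List.len lines])).map
      (fun ab => PySem.Str.strip (PySem.Str.join "\n" (PySem.List.slice lines (some ab.1) (some ab.2))))
  if parts.length ≤ 1 then charChunks md_body
  else
    let cleaned := parts.filter (fun p => 120 < PySem.Str.len p)
    if cleaned ≠ [] then cleaned else charChunks md_body

-- ===== PRECONDITION & SPEC =====
def Spec_smart_chunk_markdown (md_body : String) (out : List String) : Prop := out = smart_chunk_markdown_alt md_body
instance (md_body : String) (out : List String) : Decidable (Spec_smart_chunk_markdown md_body out) := by unfold Spec_smart_chunk_markdown; infer_instance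

-- ===== CLAIM (what is proved, stated in full; the proofs are below) =====
def Claim_equal_smart_chunk_markdown : Prop := ∀ (md_body : String), Dom_smart_chunk_markdown md_body → Spec_smart_chunk_markdown md_body (smart_chunk_markdown md_body)

-- ===== LEMMAS AND PROOFS =====

-- the sections of `ls` when `cur` is the currently open (pending) section
def pvSecsFrom (cur : List String) : List String → List (List String)
  | [] => if cur = [] then [] else [cur]
  | l :: rest =>
      if PySem.Str.startswith l "## " then
        (if cur = [] then pvSecsFrom [l] rest else cur :: pvSecsFrom [l] rest)
      else pvSecsFrom (cur ++ [l]) rest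

-- heading-line indices of a line list, recursively
def pvRaw : List String → List Nat
  | [] => []
  | l :: rest => (if PySem.Str.startswith l "## " then [0] else []) ++ (pvRaw rest).map (· + 1)

def pvF (sec : List String) : String := PySem.Str.strip (PySem.Str.join "\n" sec)

lemma pvA_foldl (ls : List String) : ∀ (parts cur : List String),
    (let st := ls.foldl (fun (st : List String × List String) line =>
        let st1 := if PySem.Str.startswith line "## " then
                     (if st.2 ≠ [] then (st.1 ++ [PySem.Str.strip (PySem.Str.join "\n" st.2)], ([] : List String)) else st)
                   else st
        (st1.1, st1.2 ++ [line])) (parts, cur)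
     if st.2 ≠ [] then st.1 ++ [PySem.Str.strip (PySem.Str.join "\n" st.2)] else st.1)
    = parts ++ (pvSecsFrom cur ls).map pvF := by
  induction ls with
  | nil =>
    intro parts cur
    simp only [List.foldl_nil, pvSecsFrom]
    by_cases hc : cur = [] <;> simp [hc, pvF]
  | cons l rest ih =>
    intro parts cur
    simp only [List.foldl_cons, pvSecsFrom]
    by_cases hp : PySem.Str.startswith l "## " <;> by_cases hc : cur = [] <;>
      simp only [hp, hc, if_true, if_false, ne_eq, not_true, not_false_iff]
    · simpa [hc] using ih parts [l]
    · have := ih (parts ++ [pvF cur]) [l]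
      simpa [hc, pvF] using this
    · simpa [hc] using ih parts [l]
    · simpa [hc] using ih parts (cur ++ [l])

lemma pvSecsFrom_nil_cons (l : String) (rest : List String) :
    pvSecsFrom [] (l :: rest) = pvSecsFrom [l] rest := by
  simp only [pvSecsFrom]
  by_cases hp : PySem.Str.startswith l "## " <;> simp

lemma pvE (ls : List String) : ∀ (s : Int),
    ((PySem.List.enumerate ls s).filter (fun il => PySem.Str.startswith il.2 "## ")).map (·.1)
    = (pvRaw ls).map (fun n : Nat => (n : Int) + s) := by
  induction ls with
  | nil => intro s; simp [PySem.List.enumerate_nil, pvRaw]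
  | cons l rest ih =>
    intro s
    rw [PySem.List.enumerate_cons]
    simp only [List.filter_cons, pvRaw]
    by_cases hp : PySem.Str.startswith l "## " <;>
      simp only [hp, if_true, if_false, Bool.false_eq_true, List.map_cons,
        List.map_map, List.nil_append, List.singleton_append, ih (s + 1)]
    · refine congrArg₂ List.cons (by push_cast; ring) ?_
      apply List.map_congr_left; intro n _; simp [Function.comp]; ring
    · apply List.map_congr_left; intro n _; simp [Function.comp]; ring

lemma pvS {α : Type} (pre X : List α) (u v : List Nat) :
    ((u.map (· + pre.length)).zip (v.map (· + pre.length))).map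
      (fun ab => ((pre ++ X).drop ab.1).take (ab.2 - ab.1))
    = (u.zip v).map (fun ab => (X.drop ab.1).take (ab.2 - ab.1)) := by
  rw [List.zip_map, List.map_map]
  apply List.map_congr_left; intro ab _
  have h1 : ab.1 + pre.length = pre.length + ab.1 := by omega
  simp [Prod.map, h1, List.drop_append, List.drop_eq_nil_of_le (by omega : pre.length ≤ pre.length + ab.1)]
  congr 1
  omega

lemma pvM (ls : List String) : ∀ (cur : List String), cur ≠ [] →
    (((0 :: (pvRaw ls).map (· + cur.length)).zip ((pvRaw ls).map (· + cur.length) ++ [cur.length + ls.length])).map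
      (fun ab => ((cur ++ ls).drop ab.1).take (ab.2 - ab.1)))
    = pvSecsFrom cur ls := by
  induction ls with
  | nil =>
    intro cur hc
    simp [pvRaw, pvSecsFrom, hc]
  | cons r ls' ih =>
    intro cur hc
    by_cases hp : PySem.Str.startswith r "## "
    · have h1 := pvS cur (r :: ls') (0 :: (pvRaw ls').map (· + 1)) ((pvRaw ls').map (· + 1) ++ [1 + ls'.length])
      have h2 := ih [r] (by simp)
      simp only [List.map_cons, List.map_append, List.map_map, List.map_nil, Nat.zero_add,
        List.length_cons, List.length_nil, List.singleton_append,
        Function.comp_def] at h1 h2 ⊢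
      simp only [pvRaw, hp, if_true, List.singleton_append, List.map_cons, List.map_map,
        Function.comp_def]
      simp only [pvSecsFrom, hp, if_true, hc, if_false]
      rw [show cur.length + (ls'.length + 1) = 1 + ls'.length + cur.length from by omega]
      simp only [Nat.zero_add]
      refine congrArg₂ List.cons ?_ (h1.trans h2)
      simp
    · have h2 := ih (cur ++ [r]) (by simp)
      simp only [List.length_append, List.length_cons, List.length_nil, Nat.zero_add,
        List.append_assoc, List.singleton_append] at h2
      simp only [pvRaw, pvSecsFrom, hp, Bool.false_eq_true, if_false, List.nil_append,
        List.map_map, Function.comp_def, List.length_cons]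
      have hA : List.map (fun x => x + 1 + cur.length) (pvRaw ls') = List.map (fun x => x + (cur.length + 1)) (pvRaw ls') :=
        List.map_congr_left (fun n _ => by omega)
      rw [hA, show cur.length + (ls'.length + 1) = cur.length + 1 + ls'.length from by omega, h2]

-- B's parts expression, named for the proofs
def pvPartsB (lines : List String) : List String :=
  let cuts0 := ((PySem.List.enumerate lines).filter (fun il => PySem.Str.startswith il.2 "## ")).map (·.1)
  let cuts := if cuts0.head? = some 0 then cuts0 else 0 :: cuts0
  (cuts.zip (cuts.tail ++ [PySem.List.len lines])).map
    (fun ab => PySem.Str.strip (PySem.Str.join "\n" (PySem.List.slice lines (some ab.1) (some ab.2))))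

lemma pvPartsB_cons (l : String) (rest : List String) :
    pvPartsB (l :: rest) = (pvSecsFrom [l] rest).map pvF := by
  have hcuts0 : ((PySem.List.enumerate (l :: rest) (0:Int)).filter (fun il => PySem.Str.startswith il.2 "## ")).map (·.1)
      = (pvRaw (l :: rest)).map (fun n : Nat => (n : Int)) := by
    rw [pvE]
    apply List.map_congr_left; intro n _; ring
  have hcuts : (if ((((PySem.List.enumerate (l :: rest) (0:Int)).filter (fun il => PySem.Str.startswith il.2 "## ")).map (·.1)).head? = some 0) then
        (((PySem.List.enumerate (l :: rest) (0:Int)).filter (fun il => PySem.Str.startswith il.2 "## ")).map (·.1))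
      else 0 :: (((PySem.List.enumerate (l :: rest) (0:Int)).filter (fun il => PySem.Str.startswith il.2 "## ")).map (·.1)))
      = (0 :: (pvRaw rest).map (· + 1)).map (fun n : Nat => (n : Int)) := by
    rw [hcuts0]
    by_cases hp : PySem.Str.startswith l "## "
    · simp only [pvRaw, hp, if_true, List.singleton_append, List.map_cons, List.head?_cons,
        Nat.cast_zero]
    · simp only [pvRaw, hp, Bool.false_eq_true, if_false, List.nil_append, List.map_map]
      rw [if_neg ?_]
      · simp
      · cases hr : pvRaw rest with
        | nil => simp
        | cons n ns => simp; omega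
  have hM := pvM rest [l] (by simp)
  simp only [List.length_cons, List.length_nil, Nat.zero_add, List.singleton_append] at hM
  simp only [pvPartsB, hcuts]
  have hsnd : (List.map (fun n : Nat => (n : Int)) (0 :: (pvRaw rest).map (· + 1))).tail ++ [PySem.List.len (l :: rest)]
      = List.map (fun n : Nat => (n : Int)) ((pvRaw rest).map (· + 1) ++ [1 + rest.length]) := by
    simp only [List.map_cons, List.tail_cons, List.map_append, List.map_nil,
      PySem.List.len_eq, List.length_cons]
    congr 1
    simp
    omega
  rw [hsnd, List.zip_map, List.map_map, ← hM, List.map_map]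
  apply List.map_congr_left
  intro ab hab
  simp only [Function.comp_def, Prod.map, PySem.List.slice_natCast, pvF]

lemma pvMain (md_body : String) : smart_chunk_markdown md_body = smart_chunk_markdown_alt md_body := by
  have hB : ∀ lines, (pvPartsB lines) = (let cuts0 := ((PySem.List.enumerate lines).filter (fun il => PySem.Str.startswith il.2 "## ")).map (·.1)
      let cuts := if cuts0.head? = some 0 then cuts0 else 0 :: cuts0
      (cuts.zip (cuts.tail ++ [PySem.List.len lines])).map
        (fun ab => PySem.Str.strip (PySem.Str.join "
" (PySem.List.slice lines (some ab.1) (some ab.2))))) := fun _ => rfl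
  simp only [smart_chunk_markdown, smart_chunk_markdown_alt, ← hB]
  have hA := pvA_foldl (PySem.Str.splitlines md_body) [] []
  simp only [] at hA
  rw [hA]
  simp only [List.nil_append]
  cases hl : PySem.Str.splitlines md_body with
  | nil =>
    simp [pvPartsB, pvSecsFrom, PySem.List.enumerate_nil]
  | cons l rest =>
    rw [pvSecsFrom_nil_cons, ← pvPartsB_cons]

-- ===== VERDICT (by name: the statement is the Claim_ definition above) =====
theorem smart_chunk_markdown_spec : Claim_equal_smart_chunk_markdown := by
  intro md_body _
  unfold Spec_smart_chunk_markdown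
  exact pvMain md_body
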